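-- pv_equiv track=rewrite | github.com/miliar/Code_Jam_Webscraper | solutions_python/Problem_181/1306.py | get_last_word
-- ===== SOURCE A (Python) =====
-- def get_last_word(S, word=''):
--     for s in S:
--         if word == '':
--             word = s
--         else:
--             if ord(s) >= ord(word[0]):
--                 word = s+word
--             else:
--                 word = word + s
--     return word
-- ===== SOURCE B (Python) =====
-- def get_last_word(S, word=''):
--     # Characterization: A prepends s exactly when s is >= the running maximum
--     # of everything seen before it (seeded with word[0]); otherwise it appends.
--     # So: compute the prefix-maximum array in one pass, then classify by it.
--     if not word:
--         if not S:
--             return ''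
--         word = S[0]
--         S = S[1:]
--     maxes = []
--     m = word[0]
--     for s in S:
--         maxes.append(m)
--         if s > m:
--             m = s
--     front = [s for s, t in zip(S, maxes) if s >= t]
--     back = [s for s, t in zip(S, maxes) if s < t]
--     return ''.join(front[::-1]) + word + ''.join(back)
-- ===== Notes on version B (the rewrite author's own statement) =====
-- stated objective: faster
-- what changed: B replaces A's per-step string mutation with a characterization: a char is prepended iff it is >= the prefix maximum of everything before it, so B precomputes the prefix-maximum array in a first pass, then classifies chars into front/back by two filters and assembles the answer with one reverse-and-join.
import Mathlib
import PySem

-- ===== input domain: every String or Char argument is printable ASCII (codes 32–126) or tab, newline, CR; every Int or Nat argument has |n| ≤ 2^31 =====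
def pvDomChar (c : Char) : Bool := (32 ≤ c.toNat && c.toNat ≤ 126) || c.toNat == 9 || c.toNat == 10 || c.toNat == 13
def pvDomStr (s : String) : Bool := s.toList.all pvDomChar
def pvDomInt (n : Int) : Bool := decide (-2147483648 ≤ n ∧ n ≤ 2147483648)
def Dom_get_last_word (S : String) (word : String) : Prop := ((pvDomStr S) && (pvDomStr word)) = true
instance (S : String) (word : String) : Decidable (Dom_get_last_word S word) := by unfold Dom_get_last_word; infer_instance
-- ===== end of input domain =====

-- B characterizes A's result (prefix maxima are prepended, the rest appended) and builds it
-- by staged passes instead of A's repeated string re-building (faster: O(n) vs O(n^2)).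

-- ===== PORT A =====
-- loop body of A: '' test = empty list; ord(word[0]) reached only when word ≠ ''
def stepA (w : List Char) (s : Char) : List Char :=
  match w with
  | [] => [s]
  | c :: _ => if s.toNat ≥ c.toNat then s :: w else w ++ [s]

def get_last_word (S : String) (word : String) : String :=
  String.ofList (S.toList.foldl stepA word.toList)

-- ===== PORT B =====
-- first pass of Source B: the prefix-maximum array 'maxes' (m seeded with word[0])
def prefMaxes (m : Char) : List Char → List Char
  | [] => []
  | s :: t => m :: prefMaxes (if s.toNat > m.toNat then s else m) t

-- the two filter comprehensions of Source B over zip(S, maxes)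
def frontL (c : Char) (sl : List Char) : List Char :=
  ((sl.zip (prefMaxes c sl)).filter (fun p => p.2.toNat ≤ p.1.toNat)).map Prod.fst

def backL (c : Char) (sl : List Char) : List Char :=
  ((sl.zip (prefMaxes c sl)).filter (fun p => p.1.toNat < p.2.toNat)).map Prod.fst

-- final assembly: ''.join(front[::-1]) + word + ''.join(back)
def assembleB (sl wl : List Char) (c : Char) : String :=
  String.ofList ((frontL c sl).reverse ++ wl ++ backL c sl)

def get_last_word_alt (S : String) (word : String) : String :=
  match word.toList with
  | [] =>
    match S.toList with
    | [] => ""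
    | s :: rest => assembleB rest [s] s
  | c :: t => assembleB S.toList (c :: t) c

-- ===== PRECONDITION & SPEC =====
def Spec_get_last_word (S : String) (word : String) (out : String) : Prop := out = get_last_word_alt S word
instance (S : String) (word : String) (out : String) : Decidable (Spec_get_last_word S word out) := by unfold Spec_get_last_word; infer_instance

-- ===== CLAIM (what is proved, stated in full; the proofs are below) =====
def Claim_equal_get_last_word : Prop := ∀ (S : String) (word : String), Dom_get_last_word S word → Spec_get_last_word S word (get_last_word S word)

-- ===== LEMMAS AND PROOFS =====
lemma char_eq_of_toNat (a b : Char) (h : a.toNat = b.toNat) : a = b :=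
  Char.ext (UInt32.toNat_inj.mp h)

lemma frontL_cons (c s : Char) (sl : List Char) :
    frontL c (s :: sl) =
      (if c.toNat ≤ s.toNat then [s] else []) ++
        frontL (if s.toNat > c.toNat then s else c) sl := by
  by_cases h : c.toNat ≤ s.toNat <;>
    simp [frontL, prefMaxes, h]

lemma backL_cons (c s : Char) (sl : List Char) :
    backL c (s :: sl) =
      (if s.toNat < c.toNat then [s] else []) ++
        backL (if s.toNat > c.toNat then s else c) sl := by
  by_cases h : s.toNat < c.toNat <;>
    simp [backL, prefMaxes, h]

lemma fold_eq (sl : List Char) : ∀ (wl : List Char) (c : Char), wl.head? = some c →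
    List.foldl stepA wl sl = (frontL c sl).reverse ++ wl ++ backL c sl := by
  induction sl with
  | nil => intro wl c h; simp [frontL, backL, prefMaxes]
  | cons s sl ih =>
    intro wl c h
    obtain ⟨t, rfl⟩ : ∃ t, wl = c :: t := by
      cases wl with
      | nil => simp at h
      | cons a t => simp only [List.head?_cons, Option.some.injEq] at h; exact ⟨t, by rw [h]⟩
    simp only [List.foldl_cons, stepA, frontL_cons, backL_cons]
    by_cases hge : s.toNat ≥ c.toNat
    · have hcs : (if s.toNat > c.toNat then s else c) = s := by
        by_cases hgt : s.toNat > c.toNat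
        · simp [hgt]
        · simp only [if_neg hgt]
          exact char_eq_of_toNat c s (by omega)
      rw [hcs, if_pos hge, if_pos (by omega), if_neg (by omega),
        ih (s :: c :: t) s (by simp)]
      simp
    · have hcs : (if s.toNat > c.toNat then s else c) = c := by
        rw [if_neg (by omega)]
      rw [hcs, if_neg hge, if_neg (by omega), if_pos (by omega),
        ih (c :: t ++ [s]) c (by simp)]
      simp

-- ===== VERDICT (by name: the statement is the Claim_ definition above) =====
theorem get_last_word_spec : Claim_equal_get_last_word := by
  intro S word _
  unfold Spec_get_last_word get_last_word get_last_word_alt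
  cases hw : word.toList with
  | nil =>
    cases hs : S.toList with
    | nil => rfl
    | cons s rest =>
      simp only [List.foldl_cons, stepA, assembleB]
      rw [fold_eq rest [s] s (by simp)]
  | cons c t =>
    simp only [assembleB]
    rw [fold_eq S.toList (c :: t) c (by simp)]
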